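-- pv_equiv track=rewrite | github.com/yuxin101/skills | skills/weixijia/job-claw/scripts/search.py | infer_interview_type
-- ===== SOURCE A (Python) =====
-- def infer_interview_type(mode: str, title: str, description: str = "") -> str:
--     text = f"{title} {description or ''}".lower()
--     if mode == "noncoding":
--         if any(w in text for w in ["research", "postdoc", "academic", "clinical", "fellow"]):
--             return "Research Talk"
--         if any(w in text for w in ["product", "pm ", "strategy", "consulting", "consultant"]):
--             return "Case Study"
--         return "No Leetcode"
--     else:
--         if any(w in text for w in ["platform", "infrastructure", "mlops", "sre", "devops"]):
--             return "Standard Coding"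
--         if any(w in text for w in ["research", "scientist"]):
--             return "Fair Coding"
--         return "Standard Coding"
-- ===== SOURCE B (Python) =====
-- KEYWORDS = ("research", "postdoc", "academic", "clinical", "fellow",
--             "product", "pm ", "strategy", "consulting", "consultant",
--             "platform", "infrastructure", "mlops", "sre", "devops",
--             "scientist")
--
--
-- def infer_interview_type(mode: str, title: str, description: str = "") -> str:
--     text = f"{title} {description or ''}".lower()
--     # single left-to-right sweep: at each position record every keyword starting there
--     found = set()
--     for i in range(len(text)):
--         for w in KEYWORDS:
--             if w not in found and text.startswith(w, i):
--                 found.add(w)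
--     if mode == "noncoding":
--         if found & {"research", "postdoc", "academic", "clinical", "fellow"}:
--             return "Research Talk"
--         if found & {"product", "pm ", "strategy", "consulting", "consultant"}:
--             return "Case Study"
--         return "No Leetcode"
--     if found & {"platform", "infrastructure", "mlops", "sre", "devops"}:
--         return "Standard Coding"
--     if found & {"research", "scientist"}:
--         return "Fair Coding"
--     return "Standard Coding"
-- ===== Notes on version B (the rewrite author's own statement) =====
-- stated objective: alternative
-- what changed: Instead of running a separate substring test per keyword in a fixed branch chain, B makes one left-to-right sweep over the lowered text, collecting into a set every keyword that starts at each position (naive multi-pattern scan), and then classifies by set intersections with the per-mode keyword groups; it trades speed (Python-level per-position checks) for a single uniform pass.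
import Mathlib
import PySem

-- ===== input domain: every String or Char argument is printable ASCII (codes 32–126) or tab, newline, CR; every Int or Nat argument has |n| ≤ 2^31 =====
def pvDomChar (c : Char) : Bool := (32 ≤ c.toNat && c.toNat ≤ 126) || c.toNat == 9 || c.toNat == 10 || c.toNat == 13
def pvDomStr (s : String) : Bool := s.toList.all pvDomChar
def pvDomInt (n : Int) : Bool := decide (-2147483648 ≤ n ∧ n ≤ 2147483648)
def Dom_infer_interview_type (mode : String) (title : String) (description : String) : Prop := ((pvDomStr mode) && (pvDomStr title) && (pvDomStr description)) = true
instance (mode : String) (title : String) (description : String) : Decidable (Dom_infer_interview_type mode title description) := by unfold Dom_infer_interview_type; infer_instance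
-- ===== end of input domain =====

-- B replaces A's per-keyword substring tests with one left-to-right sweep over the lowered text
-- that collects every keyword starting at each position into a set, then classifies by set
-- intersection with the per-mode keyword groups: a different (multi-pattern scan) algorithm; it trades
-- speed (Python-level per-position checks) for a single uniform pass.


-- ===== PORT A =====
def infer_interview_type (mode : String) (title : String) (description : String) : String :=
  let text := PySem.Str.lower (title ++ " " ++ description)
  if mode == "noncoding" then
    if (["research", "postdoc", "academic", "clinical", "fellow"]).any (fun w => PySem.Str.isIn w text) then
      "Research Talk"
    else if (["product", "pm ", "strategy", "consulting", "consultant"]).any (fun w => PySem.Str.isIn w text) then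
      "Case Study"
    else
      "No Leetcode"
  else
    if (["platform", "infrastructure", "mlops", "sre", "devops"]).any (fun w => PySem.Str.isIn w text) then
      "Standard Coding"
    else if (["research", "scientist"]).any (fun w => PySem.Str.isIn w text) then
      "Fair Coding"
    else
      "Standard Coding"

-- ===== PORT B =====
-- the KEYWORDS tuple of Source B, as lists of chars
def pvKeywords : List (List Char) :=
  ["research".toList, "postdoc".toList, "academic".toList, "clinical".toList, "fellow".toList,
   "product".toList, "pm ".toList, "strategy".toList, "consulting".toList, "consultant".toList,
   "platform".toList, "infrastructure".toList, "mlops".toList, "sre".toList, "devops".toList,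
   "scientist".toList]

-- the sweep: for i in range(len(text)): for w in KEYWORDS: if w not in found and text.startswith(w, i): found.add(w)
-- (text.startswith(w, i) with 0 ≤ i is exactly Chars.startswith (t.drop i.toNat) w)
def pvFound (t : List Char) : PySem.Set (List Char) :=
  (PySem.List.pyRange 0 t.length 1).foldl
    (fun acc i =>
      pvKeywords.foldl
        (fun acc w =>
          if ¬ (PySem.Set.contains acc w) = true ∧ PySem.Chars.startswith (t.drop i.toNat) w = true
          then PySem.Set.add acc w else acc)
        acc)
    PySem.Set.empty

-- Python truthiness of 'found & {…}': set intersection is nonempty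
def pvHits (found : PySem.Set (List Char)) (group : List (List Char)) : Bool :=
  decide (PySem.Set.inter found group ≠ [])

def infer_interview_type_alt (mode : String) (title : String) (description : String) : String :=
  let text := (PySem.Str.lower (title ++ " " ++ description)).toList
  let found := pvFound text
  if mode == "noncoding" then
    if pvHits found (PySem.Set.ofList ["research".toList, "postdoc".toList, "academic".toList, "clinical".toList, "fellow".toList]) then
      "Research Talk"
    else if pvHits found (PySem.Set.ofList ["product".toList, "pm ".toList, "strategy".toList, "consulting".toList, "consultant".toList]) then
      "Case Study"
    else
      "No Leetcode"
  else
    if pvHits found (PySem.Set.ofList ["platform".toList, "infrastructure".toList, "mlops".toList, "sre".toList, "devops".toList]) then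
      "Standard Coding"
    else if pvHits found (PySem.Set.ofList ["research".toList, "scientist".toList]) then
      "Fair Coding"
    else
      "Standard Coding"

-- ===== PRECONDITION & SPEC =====
def Spec_infer_interview_type (mode : String) (title : String) (description : String) (out : String) : Prop := out = infer_interview_type_alt mode title description
instance (mode : String) (title : String) (description : String) (out : String) : Decidable (Spec_infer_interview_type mode title description out) := by unfold Spec_infer_interview_type; infer_instance

-- ===== CLAIM =====
def Claim_equal_infer_interview_type : Prop := ∀ (mode : String) (title : String) (description : String), Dom_infer_interview_type mode title description → Spec_infer_interview_type mode title description (infer_interview_type mode title description)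

-- ===== LEMMAS AND PROOFS =====

-- inner loop: membership in the accumulator after one pass over the keyword list
theorem pv_mem_inner (t : List Char) (i : Nat) (kws : List (List Char))
    (acc : PySem.Set (List Char)) (y : List Char) :
    y ∈ kws.foldl
        (fun acc w =>
          if ¬ (PySem.Set.contains acc w) = true ∧ PySem.Chars.startswith (t.drop i) w = true
          then PySem.Set.add acc w else acc) acc
      ↔ y ∈ acc ∨ (y ∈ kws ∧ PySem.Chars.startswith (t.drop i) y = true) := by
  induction kws generalizing acc with
  | nil => simp
  | cons w kws ih =>
    have key : y ∈ (if ¬ (PySem.Set.contains acc w) = true ∧ PySem.Chars.startswith (t.drop i) w = true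
          then PySem.Set.add acc w else acc)
        ↔ y ∈ acc ∨ (y = w ∧ PySem.Chars.startswith (t.drop i) y = true) := by
      split_ifs with h
      · rw [PySem.Set.mem_add]
        constructor
        · rintro (hm | rfl)
          · exact Or.inl hm
          · exact Or.inr ⟨rfl, h.2⟩
        · rintro (hm | ⟨rfl, _⟩)
          · exact Or.inl hm
          · exact Or.inr rfl
      · constructor
        · exact Or.inl
        · rintro (hm | ⟨rfl, hsw⟩)
          · exact hm
          · rcases not_and_or.mp h with hc | hs'
            · exact (PySem.Set.contains_iff _ _).mp (not_not.mp hc)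
            · exact absurd hsw hs'
    simp only [List.foldl_cons, List.mem_cons, ih, key]
    tauto

-- outer loop over an arbitrary index list
theorem pv_mem_outer (t : List Char) (L : List Int) (acc : PySem.Set (List Char)) (y : List Char) :
    y ∈ L.foldl
        (fun acc i =>
          pvKeywords.foldl
            (fun acc w =>
              if ¬ (PySem.Set.contains acc w) = true ∧ PySem.Chars.startswith (t.drop i.toNat) w = true
              then PySem.Set.add acc w else acc) acc) acc
      ↔ y ∈ acc ∨ (y ∈ pvKeywords ∧ ∃ i ∈ L, PySem.Chars.startswith (t.drop i.toNat) y = true) := by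
  induction L generalizing acc with
  | nil => simp
  | cons i L ih =>
    simp only [List.foldl_cons, ih, pv_mem_inner, List.mem_cons]
    constructor
    · rintro (⟨h | ⟨hk, hs⟩⟩ | ⟨hk, j, hj, hs⟩)
      · exact Or.inl h
      · exact Or.inr ⟨hk, i, Or.inl rfl, hs⟩
      · exact Or.inr ⟨hk, j, Or.inr hj, hs⟩
    · rintro (h | ⟨hk, j, (rfl | hj), hs⟩)
      · exact Or.inl (Or.inl h)
      · exact Or.inl (Or.inr ⟨hk, hs⟩)
      · exact Or.inr ⟨hk, j, hj, hs⟩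

-- the sweep finds exactly the keywords occurring in the text
theorem pv_mem_found (t : List Char) (y : List Char) (hy : y ≠ []) :
    y ∈ pvFound t ↔ y ∈ pvKeywords ∧ PySem.Chars.isIn y t = true := by
  unfold pvFound
  rw [pv_mem_outer]
  simp only [PySem.Set.empty, List.not_mem_nil, false_or]
  refine and_congr_right fun _ => ?_
  rw [← PySem.Chars.exists_prefix_drop_iff_isIn]
  constructor
  · rintro ⟨i, hi, hs⟩
    exact ⟨i.toNat, (PySem.Chars.startswith_iff _ _).mp hs⟩
  · rintro ⟨j, hp⟩
    have hjlt : j < t.length := by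
      by_contra h
      have : t.drop j = [] := List.drop_eq_nil_of_le (by omega)
      rw [this, List.prefix_nil] at hp
      exact hy hp
    refine ⟨(j : Int), ?_, ?_⟩
    · rw [PySem.List.mem_pyRange_one]; constructor <;> omega
    · rw [Int.toNat_natCast]; exact (PySem.Chars.startswith_iff _ _).mpr hp

-- a group hit is exactly 'some group keyword occurs in the text'
theorem pv_hits_iff (t : List Char) (g : List (List Char)) (hg : ∀ w ∈ g, w ≠ [] ∧ w ∈ pvKeywords) :
    pvHits (pvFound t) g = true ↔ ∃ w ∈ g, PySem.Chars.isIn w t = true := by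
  unfold pvHits
  rw [decide_eq_true_iff]
  constructor
  · intro hne
    obtain ⟨y, hy⟩ := List.exists_mem_of_ne_nil _ hne
    rw [PySem.Set.mem_inter] at hy
    obtain ⟨hyf, hyg⟩ := hy
    obtain ⟨hne', _⟩ := hg y hyg
    exact ⟨y, hyg, ((pv_mem_found t y hne').mp hyf).2⟩
  · rintro ⟨w, hwg, hin⟩ heq
    obtain ⟨hne', hk⟩ := hg w hwg
    have : w ∈ PySem.Set.inter (pvFound t) g :=
      (PySem.Set.mem_inter _ _ _).mpr ⟨(pv_mem_found t w hne').mpr ⟨hk, hin⟩, hwg⟩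
    rw [heq] at this
    exact List.not_mem_nil this

-- A's 'any' test over a word list equals B's hit test on the corresponding group
theorem pv_any_eq_hits (s : String) (ws : List String)
    (hg : ∀ w ∈ ws.map String.toList, w ≠ [] ∧ w ∈ pvKeywords) :
    (ws.any (fun w => PySem.Str.isIn w s))
      = pvHits (pvFound s.toList) (PySem.Set.ofList (ws.map String.toList)) := by
  have h := pv_hits_iff s.toList (PySem.Set.ofList (ws.map String.toList))
    (fun w hw => hg w ((PySem.Set.mem_ofList _ _).mp hw))
  rcases Bool.eq_false_or_eq_true (pvHits (pvFound s.toList) (PySem.Set.ofList (ws.map String.toList))) with hb | hb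
  · rw [hb, List.any_eq_true]
    rw [hb] at h
    obtain ⟨w, hwmem, hin⟩ := h.mp rfl
    rw [PySem.Set.mem_ofList, List.mem_map] at hwmem
    obtain ⟨w', hw', rfl⟩ := hwmem
    exact ⟨w', hw', by simpa [PySem.Str.isIn] using hin⟩
  · rw [hb, List.any_eq_false]
    intro w hw
    rw [hb] at h
    simp only [Bool.false_eq_true, false_iff] at h
    intro hc
    exact h ⟨w.toList, (PySem.Set.mem_ofList _ _).mpr (List.mem_map_of_mem hw), by
      simpa [PySem.Str.isIn] using hc⟩

-- ===== VERDICT =====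
set_option maxHeartbeats 1000000 in
theorem infer_interview_type_spec : Claim_equal_infer_interview_type := by
  intro mode title description _
  unfold Spec_infer_interview_type infer_interview_type infer_interview_type_alt
  dsimp only
  rw [pv_any_eq_hits _ ["research", "postdoc", "academic", "clinical", "fellow"] (by decide),
      pv_any_eq_hits _ ["product", "pm ", "strategy", "consulting", "consultant"] (by decide),
      pv_any_eq_hits _ ["platform", "infrastructure", "mlops", "sre", "devops"] (by decide),
      pv_any_eq_hits _ ["research", "scientist"] (by decide)]
  simp only [List.map_cons, List.map_nil]
  rfl
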